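-- pv_equiv track=rewrite | github.com/dlahyani/advent-of-code | 2022/15/solution.py | get_row_coverage_by_sensors
-- ===== SOURCE A (Python) =====
-- def minimize_intervals(intervals):
--     if len(intervals) <= 1:
--         return intervals
--
--     intervals.sort(key=lambda x: x[0])
--     minimized = [intervals[0]]
--     for i in range(1, len(intervals)):
--         last_interval = minimized[-1]
--         current_interval = intervals[i]
--         if current_interval[0] <= last_interval[1]:
--             minimized[-1] = (
--                 last_interval[0],
--                 max(last_interval[1], current_interval[1]),
--             )
--         else:
--             minimized.append(current_interval)
--
--     return minimized
--
-- def get_row_coverage_by_sensors(sensors_to_beacons_distance, row):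
--     row_coverage_ranges = []
--     for s, d in sensors_to_beacons_distance.items():
--         r = (d - abs(s[1] - row)) * 2 + 1
--         if r <= 0:
--             continue
--         row_coverage_ranges.append((s[0] - (r // 2), s[0] + r // 2 + 1))
--
--     return minimize_intervals(row_coverage_ranges)
-- ===== SOURCE B (Python) =====
-- def _absorb(span, merged):
--     # Absorb into `span` every already-merged interval it reaches (cascading),
--     # then put it back on the front.
--     a, b = span
--     while merged and merged[0][0] <= b:
--         b = max(b, merged[0][1])
--         merged = merged[1:]
--     return [(a, b)] + merged
--
--
-- def get_row_coverage_by_sensors(sensors_to_beacons_distance, row):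
--     spans = []
--     for s, d in sensors_to_beacons_distance.items():
--         k = d - abs(s[1] - row)
--         if k >= 0:
--             spans.append((s[0] - k, s[0] + k + 1))
--     spans.sort(key=lambda p: p[0])
--     merged = []
--     for span in reversed(spans):
--         merged = _absorb(span, merged)
--     return merged
-- ===== Notes on version B (the rewrite author's own statement) =====
-- stated objective: alternative
-- what changed: The interval radius is computed directly as k = d - |sy - row| instead of via r = 2k+1 and r//2, and the forward scan that keeps rewriting the last element of the merged list is replaced by a back-to-front fold in which each interval cascadingly absorbs every already-merged interval it touches.
import Mathlib
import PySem

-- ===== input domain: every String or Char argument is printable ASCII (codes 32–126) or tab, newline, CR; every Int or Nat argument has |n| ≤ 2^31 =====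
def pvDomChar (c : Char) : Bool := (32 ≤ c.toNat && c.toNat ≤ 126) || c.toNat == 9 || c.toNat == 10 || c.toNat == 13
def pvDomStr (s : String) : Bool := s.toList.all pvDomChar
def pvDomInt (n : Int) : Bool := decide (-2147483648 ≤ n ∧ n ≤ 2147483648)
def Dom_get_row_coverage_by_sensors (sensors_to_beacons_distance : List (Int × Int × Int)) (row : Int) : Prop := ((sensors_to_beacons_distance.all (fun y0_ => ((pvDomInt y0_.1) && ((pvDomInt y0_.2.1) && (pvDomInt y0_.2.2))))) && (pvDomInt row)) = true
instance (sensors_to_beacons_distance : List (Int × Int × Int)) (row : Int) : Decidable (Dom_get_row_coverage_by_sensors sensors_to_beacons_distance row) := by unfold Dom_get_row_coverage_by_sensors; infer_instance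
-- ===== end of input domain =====

-- B computes the radius directly (k = d - |sy - row|) and merges the sorted spans by a
-- back-to-front fold with cascading absorption instead of A's forward last-element-rewriting
-- scan; same return value (objective: alternative decomposition, no speed claim).
-- The dict argument is represented as an association list of ((sx, sy), d) flattened to
-- triples; both ports read it through PySem.Dict.ofList, the convention's reading of a dict.

-- ===== PORT A =====
-- state of the Python loop over `minimized`, kept REVERSED (head = minimized[-1])
def pvStepA (minimized : List (Int × Int)) (cur : Int × Int) : List (Int × Int) :=
  match minimized with
  | last :: rest =>
      if cur.1 ≤ last.2 then (last.1, max last.2 cur.2) :: rest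
      else cur :: last :: rest
  | [] => [cur]

def minimize_intervals (intervals : List (Int × Int)) : List (Int × Int) :=
  if intervals.length ≤ 1 then intervals
  else
    match PySem.List.sorted intervals (fun x => x.1) with
    | [] => []  -- unreachable (length ≥ 2)
    | first :: rest => (rest.foldl pvStepA [first]).reverse

def get_row_coverage_by_sensors (sensors_to_beacons_distance : List (Int × Int × Int)) (row : Int) : List (Int × Int) :=
  let items := (PySem.Dict.ofList (sensors_to_beacons_distance.map (fun t => ((t.1, t.2.1), t.2.2)))).items
  let row_coverage_ranges := items.foldl (fun acc sd =>
    let r := (sd.2 - |sd.1.2 - row|) * 2 + 1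
    if r ≤ 0 then acc
    else acc ++ [(sd.1.1 - PySem.Int.floordiv r 2, sd.1.1 + PySem.Int.floordiv r 2 + 1)]) []
  minimize_intervals row_coverage_ranges

-- ===== PORT B =====
def pvAbsorb : Int × Int → List (Int × Int) → List (Int × Int)
  | p, [] => [p]
  | (a, b), (c, d) :: rest =>
      if c ≤ b then pvAbsorb (a, max b d) rest
      else (a, b) :: (c, d) :: rest

def get_row_coverage_by_sensors_alt (sensors_to_beacons_distance : List (Int × Int × Int)) (row : Int) : List (Int × Int) :=
  let items := (PySem.Dict.ofList (sensors_to_beacons_distance.map (fun t => ((t.1, t.2.1), t.2.2)))).items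
  let spans := items.foldl (fun acc sd =>
    let k := sd.2 - |sd.1.2 - row|
    if k ≥ 0 then acc ++ [(sd.1.1 - k, sd.1.1 + k + 1)] else acc) []
  -- `for span in reversed(spans): merged = _absorb(span, merged)` is a right fold
  (PySem.List.sorted spans (fun p => p.1)).foldr pvAbsorb []

-- ===== PRECONDITION & SPEC =====
def Spec_get_row_coverage_by_sensors (sensors_to_beacons_distance : List (Int × Int × Int)) (row : Int) (out : List (Int × Int)) : Prop := out = get_row_coverage_by_sensors_alt sensors_to_beacons_distance row
instance (sensors_to_beacons_distance : List (Int × Int × Int)) (row : Int) (out : List (Int × Int)) : Decidable (Spec_get_row_coverage_by_sensors sensors_to_beacons_distance row out) := by unfold Spec_get_row_coverage_by_sensors; infer_instance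

-- ===== CLAIM (what is proved, stated in full; the proofs are below) =====
def Claim_equal_get_row_coverage_by_sensors : Prop := ∀ (sensors_to_beacons_distance : List (Int × Int × Int)) (row : Int), Dom_get_row_coverage_by_sensors sensors_to_beacons_distance row → Spec_get_row_coverage_by_sensors sensors_to_beacons_distance row (get_row_coverage_by_sensors sensors_to_beacons_distance row)

-- ===== LEMMAS AND PROOFS =====

-- Functional form of A's forward merge scan: current open interval (lo, hi), remaining list.
def pvGo : Int → Int → List (Int × Int) → List (Int × Int)
  | lo, hi, [] => [(lo, hi)]
  | lo, hi, (c, d) :: t =>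
      if c ≤ hi then pvGo lo (max hi d) t
      else (lo, hi) :: pvGo c d t

theorem pvGo_head (t : List (Int × Int)) : ∀ (c d : Int), ∃ H rest, pvGo c d t = (c, H) :: rest := by
  induction t with
  | nil => intro c d; exact ⟨d, [], rfl⟩
  | cons p t ih =>
    intro c d
    obtain ⟨e, f⟩ := p
    by_cases h : e ≤ d
    · obtain ⟨H, rest, hr⟩ := ih c (max d f)
      exact ⟨H, rest, by simp [pvGo, h, hr]⟩
    · exact ⟨d, pvGo e f t, by simp [pvGo, h]⟩

theorem pvFoldlA (t : List (Int × Int)) : ∀ (lo hi : Int) (acc : List (Int × Int)),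
    (t.foldl pvStepA ((lo, hi) :: acc)).reverse = acc.reverse ++ pvGo lo hi t := by
  induction t with
  | nil => intro lo hi acc; simp [pvGo]
  | cons p t ih =>
    intro lo hi acc
    obtain ⟨c, d⟩ := p
    by_cases h : c ≤ hi
    · rw [show (((c, d) :: t).foldl pvStepA ((lo, hi) :: acc))
            = t.foldl pvStepA ((lo, max hi d) :: acc) from by simp [pvStepA, h]]
      rw [ih lo (max hi d) acc]
      simp [pvGo, h]
    · rw [show (((c, d) :: t).foldl pvStepA ((lo, hi) :: acc))
            = t.foldl pvStepA ((c, d) :: (lo, hi) :: acc) from by simp [pvStepA, h]]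
      rw [ih c d ((lo, hi) :: acc)]
      simp [pvGo, h]

theorem pvAbsorb_go (t : List (Int × Int)) : ∀ (lo hi c d : Int), c ≤ hi →
    pvAbsorb (lo, hi) (pvGo c d t) = pvGo lo (max hi d) t := by
  induction t with
  | nil => intro lo hi c d h; simp [pvGo, pvAbsorb, h]
  | cons p t ih =>
    intro lo hi c d h
    obtain ⟨e, f⟩ := p
    by_cases hed : e ≤ d
    · have h1 : e ≤ max hi d := le_trans hed (le_max_right _ _)
      rw [show pvGo c d ((e, f) :: t) = pvGo c (max d f) t from by simp [pvGo, hed]]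
      rw [ih lo hi c (max d f) h]
      simp [pvGo, h1, max_assoc]
    · rw [show pvGo c d ((e, f) :: t) = (c, d) :: pvGo e f t from by simp [pvGo, hed]]
      by_cases h2 : e ≤ max hi d
      · rw [show pvAbsorb (lo, hi) ((c, d) :: pvGo e f t)
              = pvAbsorb (lo, max hi d) (pvGo e f t) from by simp [pvAbsorb, h]]
        rw [ih lo (max hi d) e f h2]
        simp [pvGo, h2, max_assoc]
      · obtain ⟨H, rest, hr⟩ := pvGo_head t e f
        rw [hr]
        simp only [pvAbsorb, h, if_pos, h2, if_neg, not_false_iff]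
        simp [pvGo, h2, hr]

theorem pvFoldr_absorb (L : List (Int × Int)) :
    L.foldr pvAbsorb [] = (match L with | [] => [] | (a, b) :: t => pvGo a b t) := by
  induction L with
  | nil => rfl
  | cons p L ih =>
    obtain ⟨a, b⟩ := p
    rw [List.foldr_cons, ih]
    match L with
    | [] => rfl
    | (c, d) :: t =>
      by_cases h : c ≤ b
      · simp only []
        rw [pvAbsorb_go t a b c d h]
        simp [pvGo, h]
      · obtain ⟨H, rest, hr⟩ := pvGo_head t c d
        simp only []
        rw [hr]
        simp [pvAbsorb, h, pvGo, hr]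

theorem pvSpans_eq (items : List ((Int × Int) × Int)) (row : Int) : ∀ acc : List (Int × Int),
    items.foldl (fun acc sd =>
      let r := (sd.2 - |sd.1.2 - row|) * 2 + 1
      if r ≤ 0 then acc
      else acc ++ [(sd.1.1 - PySem.Int.floordiv r 2, sd.1.1 + PySem.Int.floordiv r 2 + 1)]) acc
    = items.foldl (fun acc sd =>
      let k := sd.2 - |sd.1.2 - row|
      if k ≥ 0 then acc ++ [(sd.1.1 - k, sd.1.1 + k + 1)] else acc) acc := by
  induction items with
  | nil => intro acc; rfl
  | cons sd items ih =>
    intro acc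
    simp only [List.foldl_cons]
    rw [← ih]
    congr 1
    set k := sd.2 - |sd.1.2 - row| with hk
    by_cases h : k ≥ 0
    · have hr : ¬ (k * 2 + 1 ≤ 0) := by omega
      have hd : PySem.Int.floordiv (k * 2 + 1) 2 = k := by
        rw [PySem.Int.floordiv_eq_iff_of_pos (by omega)]; omega
      simp only [h, hr, if_pos, if_neg, not_false_iff, hd]
    · have hr : k * 2 + 1 ≤ 0 := by omega
      simp [h, hr]

theorem pvMinimize_eq (L : List (Int × Int)) :
    minimize_intervals L = (PySem.List.sorted L (fun p => p.1)).foldr pvAbsorb [] := by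
  rw [pvFoldr_absorb]
  match hL : L with
  | [] => rfl
  | [⟨a, b⟩] =>
    have hs : PySem.List.sorted [((a : Int), (b : Int))] (fun p => p.1) = [(a, b)] :=
      PySem.List.sorted_eq_self_of_pairwise _ _ (by simp)
    simp only [minimize_intervals, List.length_cons, List.length_nil, le_refl, if_pos, hs]
    rfl
  | p :: q :: t =>
    have hlen : ¬ ((p :: q :: t).length ≤ 1) := by simp
    have hlen2 : (PySem.List.sorted (p :: q :: t) (fun x => x.1)).length = (p :: q :: t).length :=
      PySem.List.length_sorted _ _ _
    match hs : PySem.List.sorted (p :: q :: t) (fun x => x.1) with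
    | [] => rw [hs] at hlen2; simp at hlen2
    | ⟨a, b⟩ :: rest =>
      simp only [minimize_intervals, hlen, if_neg, not_false_iff, hs]
      have := pvFoldlA rest a b []
      simpa using this

-- ===== VERDICT (by name: the statement is the Claim_ definition above) =====
theorem get_row_coverage_by_sensors_spec : Claim_equal_get_row_coverage_by_sensors := by
  intro sensors row _
  unfold Spec_get_row_coverage_by_sensors
  unfold get_row_coverage_by_sensors get_row_coverage_by_sensors_alt
  simp only []
  rw [pvSpans_eq, pvMinimize_eq]
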